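-- pv_equiv track=rewrite | github.com/Dis-count/ProgrammingPractice | 255.py | secondHighest
-- ===== SOURCE A (Python) =====
-- def secondHighest(s: str) -> int:
--     first = second = -1
--     for c in s:
--         if c.isdigit():
--             num = int(c)
--             if num > first:
--                 second = first
--                 first = num
--             elif second < num < first:
--                 second = num
--     return second
-- ===== SOURCE B (Python) =====
-- def secondHighest(s: str) -> int:
--     digits = sorted({int(c) for c in s if c.isdigit()}, reverse=True)
--     return digits[1] if len(digits) >= 2 else -1
-- ===== Notes on version B (the rewrite author's own statement) =====
-- stated objective: simpler
-- what changed: Replaces A's single-pass first/second running-maximum tracking with collecting the set of distinct digits, sorting it descending, and returning the element at index 1 (or -1 if fewer than two distinct digits).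
import Mathlib
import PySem

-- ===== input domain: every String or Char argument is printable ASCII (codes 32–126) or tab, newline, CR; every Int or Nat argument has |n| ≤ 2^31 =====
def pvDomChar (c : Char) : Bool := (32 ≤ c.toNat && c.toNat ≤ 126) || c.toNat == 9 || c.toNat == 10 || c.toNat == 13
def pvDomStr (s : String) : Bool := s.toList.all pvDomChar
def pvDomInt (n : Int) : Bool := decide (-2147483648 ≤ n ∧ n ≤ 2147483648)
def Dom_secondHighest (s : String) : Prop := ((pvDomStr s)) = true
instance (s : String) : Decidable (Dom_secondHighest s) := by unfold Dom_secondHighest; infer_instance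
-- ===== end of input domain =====

-- B replaces A's single-pass first/second running-maximum tracking by collecting the set of
-- distinct digits and sorting it descending (objective: simpler; same cost).

-- ===== PORT A =====
-- int(c) for a char guarded by c.isdigit() is ported as c.toNat - 48: exact for ASCII digit chars.
def secondHighest (s : String) : Int :=
  (s.toList.foldl (fun (p : Int × Int) c =>
      if PySem.Chars.isdigit c then
        let num : Int := (c.toNat : Int) - 48
        if num > p.1 then (num, p.1)
        else if p.2 < num ∧ num < p.1 then (p.1, num)
        else p
      else p) (-1, -1)).2

-- ===== PORT B =====
-- set comprehension → PySem.Set.ofList of the filtered/mapped chars; sorted(…, reverse=True)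
-- with the identity key is order-safe on a set.
def secondHighest_alt (s : String) : Int :=
  let digits := PySem.List.sorted
    (PySem.Set.ofList ((s.toList.filter (fun c => PySem.Chars.isdigit c)).map
      (fun c => ((c.toNat : Int) - 48))))
    (fun x => x) true
  if 2 ≤ PySem.List.len digits then PySem.List.pyGetD digits 1 (-1) else -1

-- ===== PRECONDITION & SPEC =====
def Spec_secondHighest (s : String) (out : Int) : Prop := out = secondHighest_alt s
instance (s : String) (out : Int) : Decidable (Spec_secondHighest s out) := by unfold Spec_secondHighest; infer_instance

-- ===== CLAIM (what is proved, stated in full; the proofs are below) =====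
def Claim_equal_secondHighest : Prop := ∀ (s : String), Dom_secondHighest s → Spec_secondHighest s (secondHighest s)

-- ===== LEMMAS AND PROOFS =====

-- A's loop body on an already-extracted digit value.
def stepA (p : Int × Int) (n : Int) : Int × Int :=
  if n > p.1 then (n, p.1)
  else if p.2 < n ∧ n < p.1 then (p.1, n)
  else p

-- the digit values occurring in cs, in order
def digs (cs : List Char) : List Int :=
  cs.filterMap (fun c => if PySem.Chars.isdigit c then some ((c.toNat : Int) - 48) else none)

def top1 (ds : List Int) : Int := ds.foldl max (-1)
def top2 (ds : List Int) : Int := (ds.filter (fun x => decide (x < top1 ds))).foldl max (-1)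

lemma digs_pos (cs : List Char) : ∀ x ∈ digs cs, 0 ≤ x := by
  intro x hx
  simp only [digs, List.mem_filterMap] at hx
  obtain ⟨c, _, hc⟩ := hx
  rcases Bool.eq_false_or_eq_true (PySem.Chars.isdigit c) with h | h
  · rw [if_pos h] at hc
    obtain rfl := Option.some.inj hc
    simp [PySem.Chars.isdigit] at h
    obtain ⟨h1, -⟩ := h
    have h3 : ('0' : Char).toNat ≤ c.toNat := by exact_mod_cast h1
    have h4 : ('0' : Char).toNat = 48 := rfl
    omega
  · rw [if_neg (by simp [h])] at hc
    cases hc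

lemma filter_map_eq_digs (cs : List Char) :
    (cs.filter (fun c => PySem.Chars.isdigit c)).map (fun c => ((c.toNat : Int) - 48)) = digs cs := by
  induction cs with
  | nil => rfl
  | cons c cs ih =>
    simp only [digs, List.filter_cons, List.filterMap_cons]
    split <;> simp_all [digs]

lemma A_foldl (cs : List Char) (p : Int × Int) :
    cs.foldl (fun (p : Int × Int) c =>
      if PySem.Chars.isdigit c then
        let num : Int := (c.toNat : Int) - 48
        if num > p.1 then (num, p.1)
        else if p.2 < num ∧ num < p.1 then (p.1, num)
        else p
      else p) p = (digs cs).foldl stepA p := by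
  induction cs generalizing p with
  | nil => rfl
  | cons c cs ih =>
    simp only [digs, List.filterMap_cons, List.foldl_cons]
    by_cases h : PySem.Chars.isdigit c = true
    · simp only [h, if_pos, List.foldl_cons]
      rw [ih]; rfl
    · rw [if_neg h, if_neg h]
      exact ih p

lemma foldl_max_eq (ds : List Int) (d m : Int) (hd : d ≤ m) (hm : m = d ∨ m ∈ ds)
    (hub : ∀ x ∈ ds, x ≤ m) : ds.foldl max d = m := by
  induction ds generalizing d with
  | nil =>
    simp only [List.not_mem_nil, or_false] at hm
    simp [hm]
  | cons x xs ih =>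
    have hx : x ≤ m := hub x (by simp)
    simp only [List.foldl_cons]
    apply ih (max d x) (by rw [max_def]; split <;> omega) ?_ (fun y hy => hub y (by simp [hy]))
    rcases hm with h | h
    · left; rw [max_def]; split <;> omega
    · rcases List.mem_cons.mp h with h | h
      · left; rw [max_def]; split <;> omega
      · right; exact h

lemma foldA (ds : List Int) : ds.foldl stepA (-1, -1) = (top1 ds, top2 ds) := by
  induction ds using List.reverseRecOn with
  | nil => rfl
  | append_singleton ds n ih =>
    have hub : ∀ y ∈ ds, y ≤ top1 ds := (PySem.List.le_foldl_max ds (-1)).2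
    have ht1 : top1 (ds ++ [n]) = max (top1 ds) n := by
      simp [top1, List.foldl_append]
    rw [List.foldl_append, ih]
    simp only [List.foldl_cons, List.foldl_nil]
    rcases lt_trichotomy (top1 ds) n with hgt | heq | hlt
    · -- n strictly larger than everything seen: new first = n, second = old first
      have hfil : (ds ++ [n]).filter (fun x => decide (x < top1 (ds ++ [n]))) = ds := by
        rw [List.filter_append]
        have h1 : ds.filter (fun x => decide (x < top1 (ds ++ [n]))) = ds :=
          List.filter_eq_self.mpr (fun x hx => by
            have := hub x hx; rw [ht1]; simp; omega)
        have h2 : [n].filter (fun x => decide (x < top1 (ds ++ [n]))) = [] := by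
          rw [ht1]; simp; omega
        rw [h1, h2, List.append_nil]
      have ht2 : top2 (ds ++ [n]) = top1 ds := by
        rw [top2, hfil]; rfl
      rw [ht1, ht2, stepA, if_pos hgt]
      have : max (top1 ds) n = n := max_eq_right hgt.le
      rw [this]
    · -- n equals the current first: state unchanged
      have hmax : max (top1 ds) n = top1 ds := by omega
      have hfil : (ds ++ [n]).filter (fun x => decide (x < top1 (ds ++ [n]))) =
          ds.filter (fun x => decide (x < top1 ds)) := by
        rw [List.filter_append, ht1, hmax]
        have h2 : [n].filter (fun x => decide (x < top1 ds)) = [] := by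
          simp; omega
        rw [h2, List.append_nil]
      have ht2 : top2 (ds ++ [n]) = top2 ds := by rw [top2, hfil]; rfl
      rw [ht1, ht2, hmax, stepA]
      rw [if_neg (by omega), if_neg (by omega)]
    · -- n strictly below the first: second becomes max(second, n)
      have hmax : max (top1 ds) n = top1 ds := by omega
      have hfil : (ds ++ [n]).filter (fun x => decide (x < top1 (ds ++ [n]))) =
          ds.filter (fun x => decide (x < top1 ds)) ++ [n] := by
        rw [List.filter_append, ht1, hmax]
        congr 1
        simp; omega
      have ht2 : top2 (ds ++ [n]) = max (top2 ds) n := by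
        rw [top2, hfil, List.foldl_append]
        simp [top2]
      rw [ht1, ht2, hmax, stepA]
      rw [if_neg (by omega)]
      by_cases hs : top2 ds < n
      · rw [if_pos ⟨hs, hlt⟩]
        have : max (top2 ds) n = n := by omega
        rw [this]
      · rw [if_neg (by omega)]
        have : max (top2 ds) n = top2 ds := by omega
        rw [this]

lemma B_top2 (ds : List Int) (hpos : ∀ x ∈ ds, 0 ≤ x) :
    (if 2 ≤ PySem.List.len (PySem.List.sorted (PySem.Set.ofList ds) (fun x => x) true)
     then PySem.List.pyGetD (PySem.List.sorted (PySem.Set.ofList ds) (fun x => x) true) 1 (-1)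
     else -1) = top2 ds := by
  have hmem : ∀ x, x ∈ PySem.List.sorted (PySem.Set.ofList ds) (fun x => x) true ↔ x ∈ ds := by
    intro x
    rw [PySem.List.mem_sorted, PySem.Set.mem_ofList]
  have hnd : (PySem.List.sorted (PySem.Set.ofList ds) (fun x => x) true).Nodup :=
    (PySem.List.sorted_perm (PySem.Set.ofList ds) (fun x => x) true).nodup_iff.mpr
      (PySem.Set.nodup_ofList ds)
  have hpw : (PySem.List.sorted (PySem.Set.ofList ds) (fun x => x) true).Pairwise
      (fun a b => b ≤ a) := PySem.List.sorted_pairwise_rev (PySem.Set.ofList ds) (fun x => x)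
  match ht : PySem.List.sorted (PySem.Set.ofList ds) (fun x => x) true with
  | [] =>
    have hds : ds = [] := by
      cases hds : ds with
      | nil => rfl
      | cons y ys =>
        exfalso
        have : y ∈ ([] : List Int) := by rw [← ht, hmem, hds]; simp
        simp at this
    subst hds
    rfl
  | [a] =>
    rw [ht] at hmem hnd hpw
    have hall : ∀ x ∈ ds, x = a := by
      intro x hx
      have : x ∈ [a] := (hmem x).mpr hx
      simpa using this
    have ha : a ∈ ds := (hmem a).mp (by simp)
    have hfil : ds.filter (fun x => decide (x < top1 ds)) = [] := by
      apply List.filter_eq_nil_iff.mpr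
      intro x hx
      have hx' := hall x hx
      have h1 : top1 ds = a :=
        foldl_max_eq ds (-1) a (by have := hpos a ha; omega) (Or.inr ha)
          (fun y hy => by rw [hall y hy])
      subst hx'
      rw [h1]; simp
    simp only [PySem.List.len]
    norm_num
    rw [top2, hfil]; rfl
  | a :: b :: rest =>
    rw [ht] at hmem hnd hpw
    have hgt : (a :: b :: rest).Pairwise (fun x y => y < x) := by
      have := hpw.and hnd
      exact this.imp (fun h => lt_of_le_of_ne h.1 h.2.symm)
    have hba : b < a := (List.pairwise_cons.mp hgt).1 b (by simp)
    have hta : ∀ y ∈ b :: rest, y ≤ a := fun y hy => ((List.pairwise_cons.mp hpw).1 y hy)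
    have htb : ∀ y ∈ rest, y ≤ b :=
      fun y hy => (List.pairwise_cons.mp (List.pairwise_cons.mp hpw).2).1 y hy
    have ha : a ∈ ds := (hmem a).mp (by simp)
    have hb : b ∈ ds := (hmem b).mp (by simp)
    have hub : ∀ x ∈ ds, x ≤ a := by
      intro x hx
      have hx' : x ∈ a :: b :: rest := (hmem x).mpr hx
      rcases List.mem_cons.mp hx' with h | h
      · omega
      · exact hta x h
    have h1 : top1 ds = a :=
      foldl_max_eq ds (-1) a (by have := hpos a ha; omega) (Or.inr ha) hub
    have hlen : 2 ≤ PySem.List.len (a :: b :: rest) := by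
      simp [PySem.List.len_eq]; omega
    rw [if_pos hlen]
    have hget : PySem.List.pyGetD (a :: b :: rest) 1 (-1) = b := by
      have := PySem.List.pyGetD_ofNat (a :: b :: rest) 1 (-1) (by simp)
      simpa using this
    rw [hget, top2, h1]
    symm
    apply foldl_max_eq
    · have := hpos b hb; omega
    · right
      rw [List.mem_filter]
      exact ⟨hb, by simp; omega⟩
    · intro x hx
      rw [List.mem_filter] at hx
      obtain ⟨hxd, hxa⟩ := hx
      simp at hxa
      have hx' : x ∈ a :: b :: rest := (hmem x).mpr hxd
      rcases List.mem_cons.mp hx' with h | h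
      · omega
      · rcases List.mem_cons.mp h with h | h
        · omega
        · exact htb x h

-- ===== VERDICT (by name: the statement is the Claim_ definition above) =====
theorem secondHighest_spec : Claim_equal_secondHighest := by
  intro s _
  unfold Spec_secondHighest secondHighest secondHighest_alt
  rw [A_foldl, foldA, filter_map_eq_digs, B_top2 (digs s.toList) (digs_pos s.toList)]
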